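-- pv_equiv track=rewrite | github.com/Li-Binzhuang/DataCheck | MyDataCheck/api_comparison/job/compare_api_data_optimized.py | _find_apply_id_field
-- ===== SOURCE A (Python) =====
-- from typing import Dict, List
--
-- def _find_apply_id_field(headers: List[str], row: List[str]) -> str:
--     """查找apply_id相关字段"""
--     field_names = ['use_credit_id', 'apply_id', 'use_credit_apply_id', 'loan_no', 'ua_id', 'ua_no']
--
--     for field_name in field_names:
--         for i, header in enumerate(headers):
--             if header.lower() == field_name.lower():
--                 if i < len(row) and row[i] is not None:
--                     value = str(row[i]).strip()
--                     if value:
--                         return value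
--
--     return ""
-- ===== SOURCE B (Python) =====
-- def _find_apply_id_field(headers, row):
--     """查找apply_id相关字段 — single pass keeping the minimum-priority non-empty match"""
--     field_names = ['use_credit_id', 'apply_id', 'use_credit_apply_id', 'loan_no', 'ua_id', 'ua_no']
--     prio = {name: idx for idx, name in enumerate(field_names)}
--     best = None  # (rank, value)
--     for i, header in enumerate(headers):
--         rank = prio.get(header.lower())
--         if rank is not None and (best is None or rank < best[0]) and i < len(row) and row[i] is not None:
--             value = str(row[i]).strip()
--             if value:
--                 best = (rank, value)
--     return best[1] if best is not None else ""
-- ===== Notes on version B (the rewrite author's own statement) =====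
-- stated objective: faster
-- what changed: Replaces A's six priority-ordered full rescans of the headers (one enumerate pass per field name) by a precomputed name->priority dict and a single pass over enumerate(headers) that keeps the minimum-priority non-empty match, with strict '<' so the earliest header wins ties.
import Mathlib
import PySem

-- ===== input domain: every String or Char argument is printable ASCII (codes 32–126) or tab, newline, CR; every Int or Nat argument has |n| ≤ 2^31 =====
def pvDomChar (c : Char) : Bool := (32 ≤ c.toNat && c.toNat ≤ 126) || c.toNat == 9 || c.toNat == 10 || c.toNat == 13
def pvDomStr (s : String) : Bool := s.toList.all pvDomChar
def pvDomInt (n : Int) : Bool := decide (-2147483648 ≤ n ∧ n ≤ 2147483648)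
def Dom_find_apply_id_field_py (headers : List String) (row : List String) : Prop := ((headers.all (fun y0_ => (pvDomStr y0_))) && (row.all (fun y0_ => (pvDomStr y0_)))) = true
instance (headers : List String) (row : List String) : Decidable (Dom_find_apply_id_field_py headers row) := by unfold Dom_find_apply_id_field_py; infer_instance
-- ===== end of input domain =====

-- B replaces A's six priority-ordered rescans of the headers by a name->priority dict and one
-- pass keeping the minimum-priority non-empty match (measured constant-factor speedup).

-- ===== PORT A =====
def pvFieldNames : List String :=
  ["use_credit_id", "apply_id", "use_credit_apply_id", "loan_no", "ua_id", "ua_no"]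

-- inner 'for i, header in enumerate(headers)' loop with early return
def pvA_inner (field_name : String) (row : List String) : Nat → List String → Option String
  | _, [] => none
  | i, h :: hs =>
    if PySem.Str.lower h = PySem.Str.lower field_name then
      if i < row.length then
        -- row elements are String (never None under the type convention)
        let value := PySem.Str.strip (row[i]?.getD "")
        if value ≠ "" then some value
        else pvA_inner field_name row (i+1) hs
      else pvA_inner field_name row (i+1) hs
    else pvA_inner field_name row (i+1) hs

-- outer 'for field_name in field_names' loop
def pvA_outer (headers row : List String) : List String → Option String
  | [] => none
  | fn :: fns =>
    match pvA_inner fn row 0 headers with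
    | some v => some v
    | none => pvA_outer headers row fns

def find_apply_id_field_py (headers : List String) (row : List String) : String :=
  (pvA_outer headers row pvFieldNames).getD ""

-- ===== PORT B =====
-- prio = {name: idx for idx, name in enumerate(field_names)}
def pvB_prio : PySem.Dict String Nat :=
  (PySem.List.enumerate pvFieldNames 0).foldl (fun d p => d.insert p.2 p.1.toNat) PySem.Dict.empty

-- single pass: 'for i, header in enumerate(headers)' maintaining best = (rank, value)
def pvB_loop (row : List String) : Nat → List String → Option (Nat × String) → Option (Nat × String)
  | _, [], best => best
  | i, h :: hs, best =>
    let best' :=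
      match pvB_prio.get? (PySem.Str.lower h) with
      | none => best
      | some rank =>
        let better := match best with | none => true | some b => decide (rank < b.1)
        if better && decide (i < row.length) then
          let value := PySem.Str.strip (row[i]?.getD "")
          if value ≠ "" then some (rank, value) else best
        else best
    pvB_loop row (i+1) hs best'

def find_apply_id_field_py_alt (headers : List String) (row : List String) : String :=
  match pvB_loop row 0 headers none with
  | some b => b.2
  | none => ""

-- ===== PRECONDITION & SPEC =====
def Spec_find_apply_id_field_py (headers : List String) (row : List String) (out : String) : Prop := out = find_apply_id_field_py_alt headers row
instance (headers : List String) (row : List String) (out : String) : Decidable (Spec_find_apply_id_field_py headers row out) := by unfold Spec_find_apply_id_field_py; infer_instance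

-- ===== CLAIM (what is proved, stated in full; the proofs are below) =====
def Claim_equal_find_apply_id_field_py : Prop := ∀ (headers : List String) (row : List String), Dom_find_apply_id_field_py headers row → Spec_find_apply_id_field_py headers row (find_apply_id_field_py headers row)

-- ===== LEMMAS AND PROOFS =====

-- the candidate a header position contributes: its priority rank and stripped value, if any
def pvCand (row : List String) (p : Nat × String) : Option (Nat × String) :=
  match pvB_prio.get? (PySem.Str.lower p.2) with
  | none => none
  | some r =>
      if p.1 < row.length then
        let v := PySem.Str.strip (row[p.1]?.getD "")
        if v ≠ "" then some (r, v) else none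
      else none

def pvEnum : Nat → List String → List (Nat × String)
  | _, [] => []
  | i, h :: hs => (i, h) :: pvEnum (i+1) hs

def pvCands (row : List String) (i : Nat) (hs : List String) : List (Nat × String) :=
  (pvEnum i hs).filterMap (pvCand row)

def pvUpd (b : Option (Nat × String)) (p : Nat × String) : Option (Nat × String) :=
  match b with
  | none => some p
  | some q => if p.1 < q.1 then some p else some q

def pvBestOf (cs : List (Nat × String)) (b : Option (Nat × String)) : Option (Nat × String) :=
  cs.foldl pvUpd b

def pvMinFirst : List (Nat × String) → Option (Nat × String)
  | [] => none
  | p :: cs => match pvMinFirst cs with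
    | none => some p
    | some q => if q.1 < p.1 then some q else some p

def pvChain (cs : List (Nat × String)) : Nat → Nat → Option (Nat × String)
  | _, 0 => none
  | r, n+1 =>
    match cs.find? (fun p => decide (p.1 = r)) with
    | some p => some p
    | none => pvChain cs (r+1) n

lemma prio_get (s : String) :
    pvB_prio.get? s =
      if s = "use_credit_id" then some 0
      else if s = "apply_id" then some 1
      else if s = "use_credit_apply_id" then some 2
      else if s = "loan_no" then some 3
      else if s = "ua_id" then some 4
      else if s = "ua_no" then some 5
      else none := by
  unfold pvB_prio pvFieldNames
  simp [PySem.List.enumerate, PySem.Dict.get?_insert]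
  split_ifs <;> simp_all

lemma prio_lt6 {s : String} {r : Nat} (h : pvB_prio.get? s = some r) : r < 6 := by
  rw [prio_get] at h
  split_ifs at h <;> simp_all <;> omega

lemma cands_lt6 (row : List String) (i : Nat) (hs : List String) :
    ∀ p ∈ pvCands row i hs, p.1 < 6 := by
  intro p hp
  simp only [pvCands, List.mem_filterMap] at hp
  obtain ⟨q, -, hq⟩ := hp
  unfold pvCand at hq
  cases hg : pvB_prio.get? (PySem.Str.lower q.2) with
  | none => simp [hg] at hq
  | some r =>
    have := prio_lt6 hg
    simp only [hg] at hq
    split_ifs at hq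
    all_goals rw [Option.some_inj] at hq
    all_goals (subst hq; exact this)

lemma loopB_eq (row : List String) :
    ∀ hs i best, pvB_loop row i hs best = pvBestOf (pvCands row i hs) best := by
  intro hs
  induction hs with
  | nil => intro i best; simp [pvB_loop, pvCands, pvEnum, pvBestOf]
  | cons h hs ih =>
    intro i best
    rw [pvB_loop]
    have hcand : pvCands row i (h :: hs) =
        (pvCand row (i, h)).toList ++ pvCands row (i+1) hs := by
      cases hc : pvCand row (i, h) <;> simp [pvCands, pvEnum, hc]
    rw [hcand]
    cases hg : pvB_prio.get? (PySem.Str.lower h) with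
    | none =>
      have hc : pvCand row (i, h) = none := by simp [pvCand, hg]
      simp only [hc, Option.toList_none, List.nil_append]
      exact ih (i+1) best
    | some r =>
      by_cases hlen : i < row.length
      · have hrow : (row[i]?.getD "" : String) = row[i] := by
          simp [List.getElem?_eq_getElem hlen]
        by_cases hv : PySem.Str.strip row[i] = ""
        · have hc : pvCand row (i, h) = none := by simp [pvCand, hg, hlen, hv]
          simp only [hc, Option.toList_none, List.nil_append]
          rw [← ih (i+1)]
          congr 1
          cases best with
          | none => simp [hlen, hv]
          | some b => by_cases hr : r < b.1 <;> simp [hlen, hv, hr]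
        · have hc : pvCand row (i, h) = some (r, PySem.Str.strip row[i]) := by
            simp [pvCand, hg, hlen, hv]
          simp only [hc, Option.toList_some, List.singleton_append]
          rw [ih (i+1)]
          have hsplit : pvBestOf ((r, PySem.Str.strip row[i]) :: pvCands row (i+1) hs) best
              = pvBestOf (pvCands row (i+1) hs) (pvUpd best (r, PySem.Str.strip row[i])) := by
            simp [pvBestOf]
          rw [hsplit]
          congr 1
          cases best with
          | none => simp [pvUpd, hlen, hv]
          | some b => by_cases hr : r < b.1 <;> simp [pvUpd, hlen, hv, hr]
      · have hc : pvCand row (i, h) = none := by simp [pvCand, hg, hlen]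
        simp only [hc, Option.toList_none, List.nil_append]
        rw [← ih (i+1)]
        congr 1
        cases best <;> simp [hlen]

lemma inner_generic (row : List String) (fn : String) (r : Nat)
    (h1 : PySem.Str.lower fn = fn)
    (h2 : ∀ s, pvB_prio.get? s = some r ↔ s = fn) :
    ∀ hs i, pvA_inner fn row i hs =
      ((pvCands row i hs).find? (fun p => decide (p.1 = r))).map Prod.snd := by
  intro hs
  induction hs with
  | nil => intro i; simp [pvA_inner, pvCands, pvEnum]
  | cons h hs ih =>
    intro i
    rw [pvA_inner]
    have hcand : pvCands row i (h :: hs) =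
        (pvCand row (i, h)).toList ++ pvCands row (i+1) hs := by
      cases hc : pvCand row (i, h) <;> simp [pvCands, pvEnum, hc]
    rw [hcand]
    by_cases hh : PySem.Str.lower h = fn
    · have hg : pvB_prio.get? (PySem.Str.lower h) = some r := (h2 _).mpr hh
      rw [if_pos (by rw [h1]; exact hh)]
      by_cases hlen : i < row.length
      · have hrow : (row[i]?.getD "" : String) = row[i] := by
          simp [List.getElem?_eq_getElem hlen]
        rw [if_pos hlen]
        by_cases hv : PySem.Str.strip row[i] = ""
        · have hc : pvCand row (i, h) = none := by simp [pvCand, hg, hlen, hv]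
          simp only [hc, Option.toList_none, List.nil_append, hrow, hv, ne_eq,
            not_true_eq_false, if_false]
          exact ih (i+1)
        · have hc : pvCand row (i, h) = some (r, PySem.Str.strip row[i]) := by
            simp [pvCand, hg, hlen, hv]
          simp only [hc, Option.toList_some, List.singleton_append, hrow, hv, ne_eq,
            not_false_eq_true, if_true, List.find?_cons, decide_true]
          simp
      · have hc : pvCand row (i, h) = none := by simp [pvCand, hg, hlen]
        rw [if_neg hlen]
        simp only [hc, Option.toList_none, List.nil_append]
        exact ih (i+1)
    · rw [if_neg (by rw [h1]; exact hh)]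
      rw [ih (i+1)]
      cases hg : pvB_prio.get? (PySem.Str.lower h) with
      | none =>
        have hc : pvCand row (i, h) = none := by simp [pvCand, hg]
        simp [hc]
      | some r' =>
        have hr' : r' ≠ r := fun e => hh ((h2 _).mp (e ▸ hg))
        unfold pvCand
        simp only [hg]
        split_ifs <;> simp [hr']

lemma minFirst_mem : ∀ {cs : List (Nat × String)} {q}, pvMinFirst cs = some q → q ∈ cs := by
  intro cs
  induction cs with
  | nil => simp [pvMinFirst]
  | cons p cs ih =>
    intro q hq
    rw [pvMinFirst] at hq
    cases hm : pvMinFirst cs with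
    | none => simp [hm] at hq; simp [hq]
    | some m =>
      rw [hm] at hq
      by_cases hlt : m.1 < p.1
      · simp only [hlt, if_true, Option.some_inj] at hq
        subst hq
        exact List.mem_cons_of_mem _ (ih hm)
      · simp only [hlt, if_false, Option.some_inj] at hq
        subst hq
        simp

lemma minFirst_filter_of_find {r : Nat} :
    ∀ {cs : List (Nat × String)} {p}, cs.find? (fun q => decide (q.1 = r)) = some p →
      pvMinFirst (cs.filter (fun q => decide (r ≤ q.1))) = some p := by
  intro cs
  induction cs with
  | nil => intro p hp; simp at hp
  | cons c cs ih =>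
    intro p hp
    by_cases hc : c.1 = r
    · have hpc : p = c := by simp [hc] at hp; exact hp.symm
      rw [hpc]
      have hfc : (c :: cs).filter (fun q => decide (r ≤ q.1)) =
          c :: cs.filter (fun q => decide (r ≤ q.1)) := by
        simp [le_of_eq hc.symm]
      rw [hfc, pvMinFirst]
      cases hm : pvMinFirst (cs.filter (fun q => decide (r ≤ q.1))) with
      | none => rfl
      | some q =>
        have hq := minFirst_mem hm
        have hrq : r ≤ q.1 := by
          rw [List.mem_filter] at hq
          simpa using hq.2
        show (if q.1 < c.1 then some q else some c) = some c
        rw [if_neg (by omega)]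
    · have hp' : cs.find? (fun q => decide (q.1 = r)) = some p := by
        simpa [hc] using hp
      have hIH := ih hp'
      have hpr : p.1 = r := by simpa using List.find?_some hp'
      by_cases hcr : r ≤ c.1
      · have hfc : (c :: cs).filter (fun q => decide (r ≤ q.1)) =
            c :: cs.filter (fun q => decide (r ≤ q.1)) := by
          simp [hcr]
        rw [hfc, pvMinFirst, hIH]
        show (if p.1 < c.1 then some p else some c) = some p
        rw [if_pos (by omega)]
      · have hfc : (c :: cs).filter (fun q => decide (r ≤ q.1)) =
            cs.filter (fun q => decide (r ≤ q.1)) := by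
          simp [hcr]
        rw [hfc]
        exact hIH

lemma chain_eq_minFirst :
    ∀ (n r : Nat) (cs : List (Nat × String)), (∀ p ∈ cs, p.1 < r + n) →
      pvChain cs r n = pvMinFirst (cs.filter (fun q => decide (r ≤ q.1))) := by
  intro n
  induction n with
  | zero =>
    intro r cs hb
    have hfil : cs.filter (fun q => decide (r ≤ q.1)) = [] := by
      rw [List.filter_eq_nil_iff]
      intro a ha
      have := hb a ha
      simp only [decide_eq_true_eq]
      omega
    simp [pvChain, hfil, pvMinFirst]
  | succ n ih =>
    intro r cs hb
    rw [pvChain]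
    cases hf : cs.find? (fun p => decide (p.1 = r)) with
    | some p => exact (minFirst_filter_of_find hf).symm
    | none =>
      have hne : ∀ p ∈ cs, p.1 ≠ r := by
        intro p hp
        have := List.find?_eq_none.mp hf p hp
        simpa using this
      have hfil : cs.filter (fun q => decide (r ≤ q.1)) =
          cs.filter (fun q => decide (r + 1 ≤ q.1)) := by
        apply List.filter_congr
        intro a ha
        have := hne a ha
        simp only [decide_eq_decide]
        omega
      rw [hfil]
      exact ih (r+1) cs (fun p hp => by have := hb p hp; omega)

lemma bestOf_eq_minFirst :
    ∀ (cs : List (Nat × String)), pvBestOf cs none = pvMinFirst cs := by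
  have key : ∀ (cs : List (Nat × String)) (b : Option (Nat × String)),
      pvBestOf cs b =
        match pvMinFirst cs, b with
        | none, b => b
        | some q, none => some q
        | some q, some a => if q.1 < a.1 then some q else some a := by
    intro cs
    induction cs with
    | nil => intro b; cases b <;> simp [pvBestOf, pvMinFirst]
    | cons p cs ih =>
      intro b
      have hstep : pvBestOf (p :: cs) b = pvBestOf cs (pvUpd b p) := by
        simp [pvBestOf]
      rw [hstep, ih, pvMinFirst]
      cases b with
      | none =>
        cases hm : pvMinFirst cs with
        | none => simp [pvUpd]
        | some q => simp only [pvUpd]; split_ifs <;> rfl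
      | some a =>
        cases hm : pvMinFirst cs with
        | none => simp [pvUpd]
        | some q =>
          simp only [pvUpd]
          by_cases h1 : p.1 < a.1 <;> by_cases h2 : q.1 < p.1 <;> by_cases h3 : q.1 < a.1 <;>
            simp only [h1, h2, h3, if_true, if_false] <;> first | rfl | (exfalso; omega)
  intro cs
  rw [key]
  cases pvMinFirst cs <;> rfl

lemma A_eq_chain (headers row : List String) :
    find_apply_id_field_py headers row =
      ((pvChain (pvCands row 0 headers) 0 6).map Prod.snd).getD "" := by
  have h2gen : ∀ (r : Nat) (fn : String),
      (if "use_credit_id" = fn then 0 else if "apply_id" = fn then 1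
        else if "use_credit_apply_id" = fn then 2 else if "loan_no" = fn then 3
        else if "ua_id" = fn then 4 else if "ua_no" = fn then 5 else 6) = r → r < 6 →
      ∀ s, pvB_prio.get? s = some r ↔ s = fn := by
    intro r fn hfn hr s
    rw [prio_get]
    split_ifs at hfn ⊢ <;> simp_all <;> omega
  have e0 := inner_generic row "use_credit_id" 0 (by rfl) (h2gen 0 _ (by decide) (by decide)) headers 0
  have e1 := inner_generic row "apply_id" 1 (by rfl) (h2gen 1 _ (by decide) (by decide)) headers 0
  have e2 := inner_generic row "use_credit_apply_id" 2 (by rfl) (h2gen 2 _ (by decide) (by decide)) headers 0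
  have e3 := inner_generic row "loan_no" 3 (by rfl) (h2gen 3 _ (by decide) (by decide)) headers 0
  have e4 := inner_generic row "ua_id" 4 (by rfl) (h2gen 4 _ (by decide) (by decide)) headers 0
  have e5 := inner_generic row "ua_no" 5 (by rfl) (h2gen 5 _ (by decide) (by decide)) headers 0
  have main : pvA_outer headers row pvFieldNames =
      (pvChain (pvCands row 0 headers) 0 6).map Prod.snd := by
    show pvA_outer headers row pvFieldNames = (pvChain (pvCands row 0 headers) 0 (5+1)).map Prod.snd
    simp only [pvFieldNames, pvA_outer, e0, e1, e2, e3, e4, e5, pvChain]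
    cases (pvCands row 0 headers).find? (fun p => decide (p.1 = 0)) with
    | some p => rfl
    | none =>
      cases (pvCands row 0 headers).find? (fun p => decide (p.1 = 1)) with
      | some p => rfl
      | none =>
        cases (pvCands row 0 headers).find? (fun p => decide (p.1 = 2)) with
        | some p => rfl
        | none =>
          cases (pvCands row 0 headers).find? (fun p => decide (p.1 = 3)) with
          | some p => rfl
          | none =>
            cases (pvCands row 0 headers).find? (fun p => decide (p.1 = 4)) with
            | some p => rfl
            | none =>
              cases (pvCands row 0 headers).find? (fun p => decide (p.1 = 5)) with
              | some p => rfl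
              | none => rfl
  rw [find_apply_id_field_py, main]

-- ===== VERDICT (by name: the statement is the Claim_ definition above) =====
theorem find_apply_id_field_py_spec : Claim_equal_find_apply_id_field_py := by
  intro headers row _
  unfold Spec_find_apply_id_field_py
  rw [A_eq_chain]
  have hB : find_apply_id_field_py_alt headers row =
      ((pvB_loop row 0 headers none).map Prod.snd).getD "" := by
    unfold find_apply_id_field_py_alt
    cases pvB_loop row 0 headers none <;> rfl
  rw [hB, loopB_eq, bestOf_eq_minFirst]
  have hfil : (pvCands row 0 headers).filter (fun q => decide (0 ≤ q.1)) =
      pvCands row 0 headers := by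
    rw [List.filter_eq_self]
    intro a ha
    simp
  rw [chain_eq_minFirst 6 0 _ (fun p hp => by simpa using cands_lt6 row 0 headers p hp), hfil]
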